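-- pv_equiv track=rewrite | github.com/phat-ktran/crawlers | codes/methods/utils.py | token2str
-- ===== SOURCE A (Python) =====
-- PAD_ID = 0
--
-- SOS_ID = 2
--
-- EOS_ID = 3
--
-- def token2str(tokens, mask, id_to_token, training=False):
--     """
--     Convert token IDs to string, ignoring PAD/SOS/EOS and masked positions.
--
--     Args:
--         tokens: list[int], token ids
--         mask: list[int], same length, 1=valid, 0=ignore
--         training: bool, whether we are decoding training targets (mask includes SOS)
--     """
--     result = []
--     for idx, (token, m) in enumerate(zip(tokens, mask)):
--         if m == 0:  # masked padding
--             continue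
--         if token == PAD_ID:
--             continue
--         if training and idx == 0 and token == SOS_ID:  # skip <SOS> at first pos
--             continue
--         if token == EOS_ID:  # stop at EOS
--             break
--         result.append(id_to_token[token])
--     return "".join(result)
-- ===== SOURCE B (Python) =====
-- PAD_ID = 0
--
-- SOS_ID = 2
--
-- EOS_ID = 3
--
-- def token2str(tokens, mask, id_to_token, training=False):
--     """Two-pass version: first find the EOS cutoff, then filter-and-join up to it."""
--     pairs = list(zip(tokens, mask))
--
--     def keep(idx, token, m):
--         return m != 0 and token != PAD_ID and not (training and idx == 0 and token == SOS_ID)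
--
--     cutoff = len(pairs)
--     for idx, (token, m) in enumerate(pairs):
--         if keep(idx, token, m) and token == EOS_ID:
--             cutoff = idx
--             break
--     return "".join(id_to_token[token]
--                    for idx, (token, m) in enumerate(pairs[:cutoff])
--                    if keep(idx, token, m))
-- ===== Notes on version B (the rewrite author's own statement) =====
-- stated objective: alternative
-- what changed: Replaces the single break-loop with an accumulator by a two-pass decomposition: one scan computes the EOS cutoff index, then a filtered comprehension over the prefix before the cutoff is joined.
import Mathlib
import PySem

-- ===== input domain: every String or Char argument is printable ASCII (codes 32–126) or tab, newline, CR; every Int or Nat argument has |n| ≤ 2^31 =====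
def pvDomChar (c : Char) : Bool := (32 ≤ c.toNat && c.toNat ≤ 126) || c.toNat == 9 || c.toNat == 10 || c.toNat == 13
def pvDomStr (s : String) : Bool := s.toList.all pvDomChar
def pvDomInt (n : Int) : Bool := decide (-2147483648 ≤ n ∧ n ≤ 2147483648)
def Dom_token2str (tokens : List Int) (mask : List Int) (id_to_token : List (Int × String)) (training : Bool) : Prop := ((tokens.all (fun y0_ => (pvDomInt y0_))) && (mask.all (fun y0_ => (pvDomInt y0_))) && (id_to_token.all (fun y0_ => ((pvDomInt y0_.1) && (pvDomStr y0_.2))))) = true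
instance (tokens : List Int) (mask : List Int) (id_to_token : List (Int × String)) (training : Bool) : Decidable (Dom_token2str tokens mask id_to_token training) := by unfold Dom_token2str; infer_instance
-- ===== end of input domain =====

-- B is a two-pass decomposition (cutoff scan, then filtered join) of A's break-loop; equal wherever A returns.

-- ===== PORT A =====
-- Python's id_to_token[token] raises KeyError on a missing key; Pre_token2str excludes
-- exactly those inputs, so getD's default "" is never used on admitted inputs.
def token2strGo (d : PySem.Dict Int String) (training : Bool) : Nat → List (Int × Int) → List String → String
  | _, [], acc => PySem.Str.join "" acc
  | idx, (t, m) :: rest, acc =>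
    if m == 0 then token2strGo d training (idx+1) rest acc
    else if t == 0 then token2strGo d training (idx+1) rest acc
    else if training && idx == 0 && t == 2 then token2strGo d training (idx+1) rest acc
    else if t == 3 then PySem.Str.join "" acc
    else token2strGo d training (idx+1) rest (acc ++ [PySem.Dict.getD d t ""])

def token2str (tokens : List Int) (mask : List Int) (id_to_token : List (Int × String)) (training : Bool) : String :=
  token2strGo (PySem.Dict.mk id_to_token) training 0 (tokens.zip mask) []

-- ===== PORT B =====
def pvKeep (training : Bool) (idx : Nat) (t m : Int) : Bool :=
  (m != 0) && (t != 0) && !(training && idx == 0 && t == 2)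

-- first index (= number of earlier pairs) where keep holds and the token is EOS; length if none
def pvCutoff (training : Bool) : Nat → List (Int × Int) → Nat
  | _, [] => 0
  | idx, (t, m) :: rest => if pvKeep training idx t m && t == 3 then 0 else pvCutoff training (idx+1) rest + 1

def pvCollect (d : PySem.Dict Int String) (training : Bool) : Nat → List (Int × Int) → List String
  | _, [] => []
  | idx, (t, m) :: rest =>
    if pvKeep training idx t m then PySem.Dict.getD d t "" :: pvCollect d training (idx+1) rest
    else pvCollect d training (idx+1) rest

def token2str_alt (tokens : List Int) (mask : List Int) (id_to_token : List (Int × String)) (training : Bool) : String :=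
  let pairs := tokens.zip mask
  -- pairs[:cutoff] with 0 ≤ cutoff ≤ len(pairs) is List.take
  PySem.Str.join "" (pvCollect (PySem.Dict.mk id_to_token) training 0 (pairs.take (pvCutoff training 0 pairs)))

-- ===== PRECONDITION & SPEC =====
-- Pre_ excludes exactly the inputs where A raises KeyError: some position before the first
-- EOS cutoff passes the keep filter but its token is missing from id_to_token.
def Pre_token2str (tokens : List Int) (mask : List Int) (id_to_token : List (Int × String)) (training : Bool) : Prop :=
  ∀ i < min tokens.length mask.length,
    (pvKeep training i (tokens.getD i 0) (mask.getD i 0) = true ∧ tokens.getD i 0 ≠ 3 ∧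
      (∀ j < i, ¬ (pvKeep training j (tokens.getD j 0) (mask.getD j 0) = true ∧ tokens.getD j 0 = 3))) →
    (PySem.Dict.mk id_to_token).contains (tokens.getD i 0) = true
instance (tokens : List Int) (mask : List Int) (id_to_token : List (Int × String)) (training : Bool) : Decidable (Pre_token2str tokens mask id_to_token training) := by unfold Pre_token2str; infer_instance

def pvWitness_token2str : List Int × List Int × (List (Int × String)) × Bool :=
  ([2, 5, 5, 3, 9], [1, 1, 0, 1, 1], [(5, "ab")], true)

def Spec_token2str (tokens : List Int) (mask : List Int) (id_to_token : List (Int × String)) (training : Bool) (out : String) : Prop := out = token2str_alt tokens mask id_to_token training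
instance (tokens : List Int) (mask : List Int) (id_to_token : List (Int × String)) (training : Bool) (out : String) : Decidable (Spec_token2str tokens mask id_to_token training out) := by unfold Spec_token2str; infer_instance

-- ===== CLAIM (what is proved, stated in full; the proofs are below) =====
def Claim_equal_token2str : Prop := ∀ (tokens : List Int) (mask : List Int) (id_to_token : List (Int × String)) (training : Bool), Dom_token2str tokens mask id_to_token training → Pre_token2str tokens mask id_to_token training → Spec_token2str tokens mask id_to_token training (token2str tokens mask id_to_token training)

-- ===== LEMMAS AND PROOFS =====
lemma goA_eq (d : PySem.Dict Int String) (tr : Bool) :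
    ∀ (L : List (Int × Int)) (idx : Nat) (acc : List String),
      token2strGo d tr idx L acc
        = PySem.Str.join "" (acc ++ pvCollect d tr idx (L.take (pvCutoff tr idx L))) := by
  intro L
  induction L with
  | nil => intro idx acc; simp [token2strGo, pvCutoff, pvCollect]
  | cons p rest ih =>
    intro idx acc
    obtain ⟨t, m⟩ := p
    by_cases hm : m == 0
    · have hk : pvKeep tr idx t m = false := by
        simp_all [pvKeep]
      simp [token2strGo, pvCutoff, pvCollect, hm, hk, ih (idx+1) acc]
    · by_cases ht0 : t == 0
      · have hk : pvKeep tr idx t m = false := by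
          simp_all [pvKeep]
        simp [token2strGo, pvCutoff, pvCollect, hm, ht0, hk, ih (idx+1) acc]
      · by_cases hsos : tr && idx == 0 && t == 2
        · have hk : pvKeep tr idx t m = false := by
            simp_all [pvKeep]
          simp [token2strGo, pvCutoff, pvCollect, hm, ht0, hsos, hk, ih (idx+1) acc]
        · have hk : pvKeep tr idx t m = true := by
            simp_all [pvKeep]; by_cases h1 : tr = true <;> by_cases h2 : idx = 0 <;> simp_all
          by_cases heos : t == 3
          · simp [token2strGo, pvCutoff, pvCollect, hm, ht0, hsos, heos, hk]
          · simp [token2strGo, pvCutoff, pvCollect, hm, ht0, hsos, heos, hk,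
                  ih (idx+1) (acc ++ [PySem.Dict.getD d t ""])]

-- ===== VERDICT (by name: the statement is the Claim_ definition above) =====
theorem token2str_spec : Claim_equal_token2str := by
  intro tokens mask id_to_token training _ _
  unfold Spec_token2str token2str token2str_alt
  simpa using goA_eq (PySem.Dict.mk id_to_token) training (tokens.zip mask) 0 []
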